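-- pv_equiv track=rewrite | github.com/Jeremy643/Project-Euler | src/Python/Problem 49/prime_permutations.py | find_combo
-- ===== SOURCE A (Python) =====
-- from itertools import combinations
--
-- def find_combo(p):
--     r = 3
--     combo = list(combinations(p, r))
--     for c in combo:
--         diff1 = abs(c[0] - c[1])
--         diff2 = abs(c[1] - c[2])
--         if diff1 == diff2:
--             return c
--     return ()
-- ===== SOURCE B (Python) =====
-- def find_combo(p):
--     # |a-b| == |b-c| iff c == a or c == 2*b - a; keep a running count of the
--     # elements after the middle position so most pairs are rejected in O(1).
--     n = len(p)
--     for i in range(n):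
--         a = p[i]
--         rest = p[i + 1:]
--         cnt = {}
--         for x in rest[1:]:
--             cnt[x] = cnt.get(x, 0) + 1
--         for j, b in enumerate(rest):
--             t = 2 * b - a
--             if cnt.get(a, 0) > 0 or cnt.get(t, 0) > 0:
--                 for c in rest[j + 1:]:
--                     if c == a or c == t:
--                         return (a, b, c)
--             if j + 1 < len(rest):
--                 nxt = rest[j + 1]
--                 cnt[nxt] = cnt.get(nxt, 0) - 1
--     return ()
-- ===== Notes on version B (the rewrite author's own statement) =====
-- stated objective: faster
-- what changed: Instead of materializing all C(n,3) combinations and testing |a-b|==|b-c| on each, B uses the characterization c==a or c==2*b-a and keeps a running count dict of the elements after the middle position, so each (first,middle) pair is rejected in O(1) and the third element is scanned for only when a match exists.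
import Mathlib
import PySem

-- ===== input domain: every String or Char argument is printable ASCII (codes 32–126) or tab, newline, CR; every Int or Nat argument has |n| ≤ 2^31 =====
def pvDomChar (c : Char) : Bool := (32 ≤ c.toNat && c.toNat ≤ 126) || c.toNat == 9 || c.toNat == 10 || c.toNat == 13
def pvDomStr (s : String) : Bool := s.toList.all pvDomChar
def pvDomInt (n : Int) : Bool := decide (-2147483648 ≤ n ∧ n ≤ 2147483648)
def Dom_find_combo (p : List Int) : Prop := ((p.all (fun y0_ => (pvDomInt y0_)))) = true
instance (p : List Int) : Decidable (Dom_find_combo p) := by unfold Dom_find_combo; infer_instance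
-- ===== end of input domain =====

-- B replaces A's scan over all C(n,3) materialized combinations by a count-dict of the
-- remaining tail plus the identity |a-b|=|b-c| ↔ c=a ∨ c=2b-a (objective: faster).

-- ===== PORT A =====
-- itertools.combinations(p, 2) (index-lexicographic order)
def combos2 : List Int → List (Int × Int)
  | [] => []
  | x :: xs => xs.map (fun y => (x, y)) ++ combos2 xs

-- itertools.combinations(p, 3) (index-lexicographic order)
def combos3 : List Int → List (Int × Int × Int)
  | [] => []
  | x :: xs => (combos2 xs).map (fun yz => (x, yz.1, yz.2)) ++ combos3 xs

-- the 'for c in combo' loop; () ↦ [], a found triple ↦ its three components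
def findc : List (Int × Int × Int) → List Int
  | [] => []
  | c :: rest =>
    let diff1 := |c.1 - c.2.1|
    let diff2 := |c.2.1 - c.2.2|
    if diff1 = diff2 then [c.1, c.2.1, c.2.2] else findc rest

def find_combo (p : List Int) : List Int := findc (combos3 p)

-- ===== PORT B =====
-- the 'for x in rest[1:]: cnt[x] = cnt.get(x, 0) + 1' loop
def altCnt (xs : List Int) : PySem.Dict Int Int :=
  xs.foldl (fun d x => d.insert x (d.getD x 0 + 1)) PySem.Dict.empty

-- the 'for c in rest[j+1:]' loop
def altScan (a t : Int) : List Int → Option Int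
  | [] => none
  | c :: cs => if c = a ∨ c = t then some c else altScan a t cs

-- the 'for j, b in enumerate(rest)' loop; tl is rest[j+1:]
def altInner (a : Int) (cnt : PySem.Dict Int Int) : List Int → Option (List Int)
  | [] => none
  | b :: tl =>
    let t := 2 * b - a
    let cnt' := match tl with
      | [] => cnt
      | nxt :: _ => cnt.insert nxt (cnt.getD nxt 0 - 1)
    if cnt.getD a 0 > 0 ∨ cnt.getD t 0 > 0 then
      match altScan a t tl with
      | some c => some [a, b, c]
      | none => altInner a cnt' tl
    else altInner a cnt' tl

-- the 'for i in range(n)' loop; a = p[i], rest = p[i+1:]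
def find_combo_alt : List Int → List Int
  | [] => []
  | a :: rest =>
    match altInner a (altCnt (rest.drop 1)) rest with
    | some r => r
    | none => find_combo_alt rest

-- ===== PRECONDITION & SPEC =====
def Spec_find_combo (p : List Int) (out : List Int) : Prop := out = find_combo_alt p
instance (p : List Int) (out : List Int) : Decidable (Spec_find_combo p out) := by unfold Spec_find_combo; infer_instance

-- ===== CLAIM (what is proved, stated in full; the proofs are below) =====
def Claim_equal_find_combo : Prop := ∀ (p : List Int), Dom_find_combo p → Spec_find_combo p (find_combo p)

-- ===== LEMMAS AND PROOFS =====
theorem abs_char (a b c : Int) : (|a - b| = |b - c|) ↔ (c = a ∨ c = 2 * b - a) := by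
  rcases abs_cases (a - b) with ⟨h1, h2⟩ <;> rcases abs_cases (b - c) with ⟨h3, h4⟩ <;> omega

theorem findc_append (l1 l2 : List (Int × Int × Int)) :
    findc (l1 ++ l2) = if findc l1 = [] then findc l2 else findc l1 := by
  induction l1 with
  | nil => simp [findc]
  | cons c rest ih =>
    by_cases h : |c.1 - c.2.1| = |c.2.1 - c.2.2|
    · simp [findc, h]
    · simp [findc, h, ih]

theorem findc_map_scan (a b : Int) (tl : List Int) :
    findc (tl.map (fun z => (a, b, z))) =
      (match altScan a (2 * b - a) tl with
       | some c => [a, b, c]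
       | none => []) := by
  induction tl with
  | nil => simp [findc, altScan]
  | cons c cs ih =>
    simp only [List.map_cons, findc, altScan]
    by_cases h : c = a ∨ c = 2 * b - a
    · rw [if_pos ((abs_char a b c).mpr h), if_pos h]
    · rw [if_neg (fun hc => h ((abs_char a b c).mp hc)), if_neg h, ih]

theorem altScan_none_iff (a t : Int) (tl : List Int) :
    altScan a t tl = none ↔ ¬ a ∈ tl ∧ ¬ t ∈ tl := by
  induction tl with
  | nil => simp [altScan]
  | cons c cs ih =>
    by_cases h : c = a ∨ c = t
    · rcases h with rfl | rfl <;> simp [altScan]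
    · have h1 : ¬ a = c := fun hh => h (Or.inl hh.symm)
      have h2 : ¬ t = c := fun hh => h (Or.inr hh.symm)
      simp [altScan, h, ih, List.mem_cons, h1, h2]

theorem altInner_eq (a : Int) (xs : List Int) :
    ∀ cnt : PySem.Dict Int Int, (∀ x, cnt.getD x 0 = ((xs.drop 1).count x : Int)) →
    findc ((combos2 xs).map (fun yz => (a, yz.1, yz.2))) =
      (match altInner a cnt xs with
       | some r => r
       | none => []) := by
  induction xs with
  | nil => intro cnt _; simp [combos2, findc, altInner]
  | cons b tl ih =>
    intro cnt hinv
    simp only [List.drop_one, List.tail_cons] at hinv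
    have hcnt' : ∀ x, (match tl with
        | [] => cnt
        | nxt :: _ => cnt.insert nxt (cnt.getD nxt 0 - 1)).getD x 0 = ((tl.drop 1).count x : Int) := by
      intro x
      cases tl with
      | nil => simpa using hinv x
      | cons v rest =>
        rw [PySem.Dict.getD_insert]
        by_cases hx : x = v
        · rw [if_pos hx, hinv v, hx]
          simp
        · rw [if_neg hx, hinv x]
          simp [List.count_cons]
          exact fun hh => hx hh.symm
    have hmap : (combos2 (b :: tl)).map (fun yz => (a, yz.1, yz.2)) =
        tl.map (fun z => (a, b, z)) ++ (combos2 tl).map (fun yz => (a, yz.1, yz.2)) := by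
      simp [combos2, Function.comp]
    rw [hmap, findc_append, findc_map_scan]
    simp only [altInner]
    by_cases hg : cnt.getD a 0 > 0 ∨ cnt.getD (2 * b - a) 0 > 0
    · rw [if_pos hg]
      cases hscan : altScan a (2 * b - a) tl with
      | some c => simp
      | none =>
        simp only [if_true]
        exact ih _ hcnt'
    · rw [if_neg hg]
      have hg1 : ¬ cnt.getD a 0 > 0 := fun hh => hg (Or.inl hh)
      have hg2 : ¬ cnt.getD (2 * b - a) 0 > 0 := fun hh => hg (Or.inr hh)
      have hnone : altScan a (2 * b - a) tl = none := by
        rw [altScan_none_iff]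
        constructor
        · intro hmem
          have hc : 0 < tl.count a := List.count_pos_iff.mpr hmem
          have hv := hinv a
          omega
        · intro hmem
          have hc : 0 < tl.count (2 * b - a) := List.count_pos_iff.mpr hmem
          have hv := hinv (2 * b - a)
          omega
      simp only [hnone]
      simp only [if_true]
      exact ih _ hcnt'

theorem altCnt_count (xs : List Int) (x : Int) : (altCnt xs).getD x 0 = (xs.count x : Int) := by
  rw [altCnt, PySem.Dict.getD_foldl_insert_add_one]
  simp [PySem.Dict.getD_empty]

theorem altInner_some_ne_nil (a : Int) (xs : List Int) :
    ∀ cnt r, altInner a cnt xs = some r → r ≠ [] := by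
  induction xs with
  | nil => intro cnt r h; simp [altInner] at h
  | cons b tl ih =>
    intro cnt r h
    simp only [altInner] at h
    split_ifs at h with hg
    · cases hscan : altScan a (2 * b - a) tl with
      | some c => rw [hscan] at h; simp at h; subst h; simp
      | none => rw [hscan] at h; exact ih _ _ h
    · exact ih _ _ h

theorem find_combo_eq (p : List Int) : find_combo p = find_combo_alt p := by
  induction p with
  | nil => simp [find_combo, combos3, findc, find_combo_alt]
  | cons a rest ih =>
    rw [find_combo, combos3, findc_append, find_combo_alt]
    rw [altInner_eq a rest (altCnt (rest.drop 1)) (fun x => altCnt_count _ x)]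
    cases h : altInner a (altCnt (rest.drop 1)) rest with
    | some r =>
      have hr := altInner_some_ne_nil a rest _ r h
      simp [hr]
    | none =>
      simp
      exact ih

-- ===== VERDICT (by name: the statement is the Claim_ definition above) =====
theorem find_combo_spec : Claim_equal_find_combo := by
  intro p _
  unfold Spec_find_combo
  exact find_combo_eq p
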